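-- pv_equiv track=rewrite | github.com/t1ooo/geeksforgeeks | swap-all-odd-and-even-bits/main.py | swapBitsV1
-- ===== SOURCE A (Python) =====
-- def swapBitsV1(num):
--     # def getBit(num, i):
--     # return (num & ( 1 << i )) >> i
--
--     def getBit(num, i):
--         return (num >> i) & 1
--
--     def setBit(num, i):
--         return num | (1 << i)
--
--     def resetBit(num, i):
--         return num & ~(1 << i)
--
--     def swap(num, i, k):
--         ib = getBit(num, i)
--         kb = getBit(num, k)
--
--         if ib == kb:
--             return num
--
--         if ib == 1:
--             i, k = k, i
--
--         num = setBit(num, i)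
--         num = resetBit(num, k)
--         return num
--
--     for i in range(1, 32, 2):
--         num = swap(num, i, i-1)
--
--     return num
-- ===== SOURCE B (Python) =====
-- def swapBitsV1(num):
--     # closed-form mask-and-shift swap of adjacent bit pairs in bits 0..31;
--     # bits above 31 (incl. the sign extension) pass through via the last term
--     return ((num & 0xAAAAAAAA) >> 1) | ((num & 0x55555555) << 1) | (num & ~0xFFFFFFFF)
-- ===== Notes on version B (the rewrite author's own statement) =====
-- stated objective: simpler
-- what changed: Replaced the per-pair getBit/setBit/resetBit swap loop with a single bit-parallel closed form: mask the odd-position bits and shift down, mask the even-position bits and shift up, OR the two together, and OR back the untouched bits above the word that the loop rewrites.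
import Mathlib
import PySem

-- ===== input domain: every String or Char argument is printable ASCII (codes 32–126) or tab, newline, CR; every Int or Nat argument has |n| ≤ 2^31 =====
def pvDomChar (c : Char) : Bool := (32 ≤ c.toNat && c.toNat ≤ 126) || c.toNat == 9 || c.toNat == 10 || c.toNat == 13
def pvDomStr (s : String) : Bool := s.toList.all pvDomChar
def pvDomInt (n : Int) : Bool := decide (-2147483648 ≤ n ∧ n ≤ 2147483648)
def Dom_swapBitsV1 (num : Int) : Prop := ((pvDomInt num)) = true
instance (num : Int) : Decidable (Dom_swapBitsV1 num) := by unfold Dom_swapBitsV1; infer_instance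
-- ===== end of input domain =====

-- B replaces A's 16-iteration per-pair swap loop by the bit-parallel mask-and-shift closed form (simpler).

-- ===== PORT A =====
def pyGetBit (num : Int) (i : Nat) : Int :=
  PySem.Int.band (num >>> i) 1

def pySetBit (num : Int) (i : Nat) : Int :=
  PySem.Int.bor num ((1 : Int) <<< i)

def pyResetBit (num : Int) (i : Nat) : Int :=
  PySem.Int.band num (Int.not ((1 : Int) <<< i))

def pySwap (num : Int) (i k : Nat) : Int :=
  let ib := pyGetBit num i
  let kb := pyGetBit num k
  if ib = kb then num
  else
    let p := if ib = 1 then (k, i) else (i, k)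
    pyResetBit (pySetBit num p.1) p.2

def swapBitsV1 (num : Int) : Int :=
  (PySem.List.pyRange 1 32 2).foldl (fun num i => pySwap num i.toNat (i - 1).toNat) num

-- ===== PORT B =====
def swapBitsV1_alt (num : Int) : Int :=
  PySem.Int.bor
    (PySem.Int.bor ((PySem.Int.band num 0xAAAAAAAA) >>> (1 : Nat))
                   ((PySem.Int.band num 0x55555555) <<< (1 : Nat)))
    (PySem.Int.band num (Int.not 0xFFFFFFFF))

-- ===== PRECONDITION & SPEC =====
def Spec_swapBitsV1 (num : Int) (out : Int) : Prop := out = swapBitsV1_alt num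
instance (num : Int) (out : Int) : Decidable (Spec_swapBitsV1 num out) := by unfold Spec_swapBitsV1; infer_instance

-- ===== CLAIM (what is proved, stated in full; the proofs are below) =====
def Claim_equal_swapBitsV1 : Prop := ∀ (num : Int), Dom_swapBitsV1 num → Spec_swapBitsV1 num (swapBitsV1 num)

-- ===== LEMMAS AND PROOFS =====

-- Nat groundwork: m - (m &&& n) clears from m exactly the bits shared with n, i.e. it is Nat.ldiff m n.
theorem pvAndAddLdiff (m : Nat) : ∀ n : Nat, (m &&& n) + Nat.ldiff m n = m := by
  induction m using Nat.binaryRec with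
  | zero =>
    intro n
    have h0 : Nat.ldiff 0 n = 0 :=
      Nat.eq_of_testBit_eq (fun i => by simp [Nat.testBit_ldiff])
    simp [h0]
  | bit b m ih =>
    intro n
    rw [← n.bit_testBit_zero_shiftRight_one, Nat.land_bit, Nat.ldiff_bit]
    have := ih (n >>> 1)
    rw [Nat.bit_val, Nat.bit_val, Nat.bit_val]
    cases b <;> cases hn : n.testBit 0 <;> simp <;> omega

theorem pvSubAnd (m n : Nat) : m - (m &&& n) = Nat.ldiff m n := by
  have := pvAndAddLdiff m n; omega

-- evaluation of PySem's band/bor on the two Int constructors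
theorem pvNotNonneg (n : Nat) : ¬ (0 : Int) ≤ Int.negSucc n :=
  not_le.mpr (Int.negSucc_lt_zero n)

theorem pvNegPart (n : Nat) : -(Int.negSucc n) - 1 = (n : Int) := by
  rw [Int.negSucc_eq]; ring

theorem pvBandPP (m n : Nat) :
    PySem.Int.band (Int.ofNat m) (Int.ofNat n) = Int.ofNat (m &&& n) := by
  simp only [PySem.Int.band, if_pos (show (0:Int) ≤ Int.ofNat m from Int.natCast_nonneg m),
    if_pos (show (0:Int) ≤ Int.ofNat n from Int.natCast_nonneg n)]
  rfl

theorem pvBandPN (m n : Nat) :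
    PySem.Int.band (Int.ofNat m) (Int.negSucc n) = Int.ofNat (m - (m &&& n)) := by
  simp only [PySem.Int.band, if_pos (show (0:Int) ≤ Int.ofNat m from Int.natCast_nonneg m),
    if_neg (pvNotNonneg n), pvNegPart]
  rfl

theorem pvBandNP (m n : Nat) :
    PySem.Int.band (Int.negSucc m) (Int.ofNat n) = Int.ofNat (n - (n &&& m)) := by
  simp only [PySem.Int.band, if_neg (pvNotNonneg m),
    if_pos (show (0:Int) ≤ Int.ofNat n from Int.natCast_nonneg n), pvNegPart]
  rfl

theorem pvBandNN (m n : Nat) :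
    PySem.Int.band (Int.negSucc m) (Int.negSucc n) = -(↑(m ||| n)) - 1 := by
  simp only [PySem.Int.band, if_neg (pvNotNonneg m), if_neg (pvNotNonneg n), pvNegPart]
  norm_num

theorem pvBorPP (m n : Nat) :
    PySem.Int.bor (Int.ofNat m) (Int.ofNat n) = Int.ofNat (m ||| n) := by
  simp only [PySem.Int.bor, if_pos (show (0:Int) ≤ Int.ofNat m from Int.natCast_nonneg m),
    if_pos (show (0:Int) ≤ Int.ofNat n from Int.natCast_nonneg n)]
  rfl

theorem pvBorPN (m n : Nat) :
    PySem.Int.bor (Int.ofNat m) (Int.negSucc n) = -(↑(n - (n &&& m))) - 1 := by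
  simp only [PySem.Int.bor, if_pos (show (0:Int) ≤ Int.ofNat m from Int.natCast_nonneg m),
    if_neg (pvNotNonneg n), pvNegPart]
  norm_num

theorem pvBorNP (m n : Nat) :
    PySem.Int.bor (Int.negSucc m) (Int.ofNat n) = -(↑(m - (m &&& n))) - 1 := by
  simp only [PySem.Int.bor, if_neg (pvNotNonneg m),
    if_pos (show (0:Int) ≤ Int.ofNat n from Int.natCast_nonneg n), pvNegPart]
  norm_num

theorem pvBorNN (m n : Nat) :
    PySem.Int.bor (Int.negSucc m) (Int.negSucc n) = -(↑(m &&& n)) - 1 := by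
  simp only [PySem.Int.bor, if_neg (pvNotNonneg m), if_neg (pvNotNonneg n), pvNegPart]
  norm_num

-- Int.testBit bridges
theorem pvTbCoe (x : Nat) (i : Nat) : Int.testBit (↑x) i = x.testBit i := rfl

theorem pvTbNegCoe (x : Nat) (i : Nat) : Int.testBit (-(↑x) - 1) i = !x.testBit i := by
  have h : -(↑x : Int) - 1 = Int.negSucc x := by rw [Int.negSucc_eq]; ring
  rw [h]; rfl

theorem pvEqOfTb (a b : Int) (h : ∀ i, a.testBit i = b.testBit i) : a = b := by
  cases a with
  | ofNat m =>
    cases b with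
    | ofNat n =>
      exact congrArg Int.ofNat (Nat.eq_of_testBit_eq fun i => h i)
    | negSucc n =>
      exfalso
      have hm : m.testBit (m + n) = false :=
        Nat.testBit_lt_two_pow (lt_of_le_of_lt (Nat.le_add_right m n) Nat.lt_two_pow_self)
      have hn : n.testBit (m + n) = false :=
        Nat.testBit_lt_two_pow (lt_of_le_of_lt (Nat.le_add_left n m) Nat.lt_two_pow_self)
      have := h (m + n)
      simp [Int.testBit, hm, hn] at this
  | negSucc m =>
    cases b with
    | ofNat n =>
      exfalso
      have hm : m.testBit (m + n) = false :=
        Nat.testBit_lt_two_pow (lt_of_le_of_lt (Nat.le_add_right m n) Nat.lt_two_pow_self)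
      have hn : n.testBit (m + n) = false :=
        Nat.testBit_lt_two_pow (lt_of_le_of_lt (Nat.le_add_left n m) Nat.lt_two_pow_self)
      have := h (m + n)
      simp [Int.testBit, hm, hn] at this
    | negSucc n =>
      have : m = n := Nat.eq_of_testBit_eq fun i => by
        have := h i
        simpa [Int.testBit] using this
      rw [this]

theorem pvTbBand (a b : Int) (i : Nat) :
    (PySem.Int.band a b).testBit i = (a.testBit i && b.testBit i) := by
  cases a with
  | ofNat m =>
    cases b with
    | ofNat n =>
      rw [pvBandPP]
      show (m &&& n).testBit i = _
      rw [Nat.testBit_and]; rfl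
    | negSucc n =>
      rw [pvBandPN]
      show (m - (m &&& n)).testBit i = _
      rw [pvSubAnd, Nat.testBit_ldiff]; rfl
  | negSucc m =>
    cases b with
    | ofNat n =>
      rw [pvBandNP]
      show (n - (n &&& m)).testBit i = _
      rw [pvSubAnd, Nat.testBit_ldiff]
      show (n.testBit i && !m.testBit i) = ((!m.testBit i) && n.testBit i)
      exact Bool.and_comm _ _
    | negSucc n =>
      rw [pvBandNN, pvTbNegCoe, Nat.testBit_or]
      show (!(m.testBit i || n.testBit i)) = ((!m.testBit i) && !n.testBit i)
      cases m.testBit i <;> cases n.testBit i <;> rfl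

theorem pvTbBor (a b : Int) (i : Nat) :
    (PySem.Int.bor a b).testBit i = (a.testBit i || b.testBit i) := by
  cases a with
  | ofNat m =>
    cases b with
    | ofNat n =>
      rw [pvBorPP]
      show (m ||| n).testBit i = _
      rw [Nat.testBit_or]; rfl
    | negSucc n =>
      rw [pvBorPN, pvSubAnd, pvTbNegCoe, Nat.testBit_ldiff]
      show (!(n.testBit i && !m.testBit i)) = (m.testBit i || !n.testBit i)
      cases m.testBit i <;> cases n.testBit i <;> rfl
  | negSucc m =>
    cases b with
    | ofNat n =>
      rw [pvBorNP, pvSubAnd, pvTbNegCoe, Nat.testBit_ldiff]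
      show (!(m.testBit i && !n.testBit i)) = (!m.testBit i || n.testBit i)
      cases m.testBit i <;> cases n.testBit i <;> rfl
    | negSucc n =>
      rw [pvBorNN, pvTbNegCoe, Nat.testBit_and]
      show (!(m.testBit i && n.testBit i)) = (!m.testBit i || !n.testBit i)
      cases m.testBit i <;> cases n.testBit i <;> rfl

theorem pvTbNot (a : Int) (i : Nat) : (Int.not a).testBit i = !a.testBit i := by
  cases a <;> simp [Int.not, Int.testBit]

theorem pvTbShr (a : Int) (k i : Nat) : (a >>> k).testBit i = a.testBit (i + k) := by
  cases a with
  | ofNat m =>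
    show (Int.ofNat (m >>> k)).testBit i = _
    simp [Int.testBit, Nat.testBit_shiftRight, Nat.add_comm]
  | negSucc m =>
    show (Int.negSucc (m >>> k)).testBit i = _
    simp [Int.testBit, Nat.testBit_shiftRight, Nat.add_comm]

theorem pvTbShlCoe (m : Nat) (k i : Nat) :
    ((↑m : Int) <<< k).testBit i = (decide (i ≥ k) && m.testBit (i - k)) := by
  have h : (↑m : Int) <<< k = ↑(m <<< k) := by
    rw [Int.shiftLeft_eq, Nat.shiftLeft_eq]
    push_cast
    ring
  rw [h, pvTbCoe, Nat.testBit_shiftLeft]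

theorem pvTbOneShl (k i : Nat) : ((1 : Int) <<< k).testBit i = decide (i = k) := by
  have h : ((1 : Int) <<< k).testBit i = (decide (i ≥ k) && Nat.testBit 1 (i - k)) :=
    pvTbShlCoe 1 k i
  have h1 : Nat.testBit 1 (i - k) = decide (0 = i - k) := by
    have := @Nat.testBit_two_pow 0 (i - k)
    simpa using this
  rw [h, h1]
  by_cases hik : i = k
  · subst hik; simp
  · by_cases hk : k ≤ i
    · simp only [ge_iff_le, hk, decide_true, Bool.true_and, decide_eq_decide]
      omega
    · simp only [ge_iff_le, hk, decide_false, Bool.false_and]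
      simp [hik]

theorem pvGetBitEq (num : Int) (i : Nat) :
    pyGetBit num i = if num.testBit i then 1 else 0 := by
  have htb : num.testBit i = (num >>> i).testBit 0 := by rw [pvTbShr, Nat.zero_add]
  rw [pyGetBit, htb]
  cases h : num >>> i with
  | ofNat m =>
    rw [show (1 : Int) = Int.ofNat 1 from rfl, pvBandPP, Nat.and_one_is_mod]
    show _ = if Nat.testBit m 0 = true then _ else _
    rw [Nat.testBit_zero]
    rcases Nat.mod_two_eq_zero_or_one m with h2 | h2 <;> simp [h2]
  | negSucc m =>
    rw [show (1 : Int) = Int.ofNat 1 from rfl, pvBandNP, Nat.and_comm, Nat.and_one_is_mod]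
    show _ = if (!Nat.testBit m 0) = true then _ else _
    rw [Nat.testBit_zero]
    rcases Nat.mod_two_eq_zero_or_one m with h2 | h2 <;> simp [h2]

theorem pvSwapTb (num : Int) (i k : Nat) (hik : i ≠ k) (j : Nat) :
    (pySwap num i k).testBit j =
      if j = i then num.testBit k else if j = k then num.testBit i else num.testBit j := by
  rw [pySwap]
  by_cases hi : num.testBit i <;> by_cases hk : num.testBit k
  · simp only [pvGetBitEq, hi, hk]
    split_ifs with h1 h2 <;> simp_all
  · simp [pvGetBitEq, hi, hk, pyResetBit, pySetBit, pvTbBand, pvTbBor, pvTbNot, pvTbOneShl]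
    by_cases h1 : j = i <;> by_cases h2 : j = k <;> simp_all
  · simp [pvGetBitEq, hi, hk, pyResetBit, pySetBit, pvTbBand, pvTbBor, pvTbNot, pvTbOneShl]
    by_cases h1 : j = i <;> by_cases h2 : j = k <;> simp_all
  · simp only [pvGetBitEq, hi, hk]
    split_ifs with h1 h2 <;> simp_all

-- characterisation of A: bit j of the result is bit (j XOR 1) of the input for j < 32, bit j otherwise
theorem pvATb (num : Int) (j : Nat) :
    (swapBitsV1 num).testBit j =
      if j < 32 then num.testBit (j ^^^ 1) else num.testBit j := by
  have hA : swapBitsV1 num = (pySwap (pySwap (pySwap (pySwap (pySwap (pySwap (pySwap (pySwap (pySwap (pySwap (pySwap (pySwap (pySwap (pySwap (pySwap (pySwap num 1 0) 3 2) 5 4) 7 6) 9 8) 11 10) 13 12) 15 14) 17 16) 19 18) 21 20) 23 22) 25 24) 27 26) 29 28) 31 30) := rfl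
  rw [hA]
  by_cases hj : j < 32
  · rw [if_pos hj]
    interval_cases j <;> simp [pvSwapTb]
  · rw [if_neg hj]
    have step : ∀ (x : Int) (a b : Nat), a ≠ b → a < 32 → b < 32 →
        (pySwap x a b).testBit j = x.testBit j := by
      intro x a b hab ha hb
      rw [pvSwapTb x a b hab j, if_neg (by omega), if_neg (by omega)]
    rw [step, step, step, step, step, step, step, step, step, step, step, step, step, step,
      step, step] <;> norm_num

-- characterisation of B, bit by bit
theorem pvMaskHi (m i b : Nat) (hm : m < 2 ^ b) (hi : b ≤ i) : m.testBit i = false :=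
  Nat.testBit_lt_two_pow (lt_of_lt_of_le hm (Nat.pow_le_pow_right (by norm_num) hi))

theorem pvMaskA (i : Nat) :
    Nat.testBit 0xAAAAAAAA i = (decide (i < 32) && decide (i % 2 = 1)) := by
  by_cases h : i < 32
  · interval_cases i <;> decide
  · rw [pvMaskHi _ _ 32 (by norm_num) (by omega)]
    simp [h]

theorem pvMask5 (i : Nat) :
    Nat.testBit 0x55555555 i = (decide (i < 32) && decide (i % 2 = 0)) := by
  by_cases h : i < 32
  · interval_cases i <;> decide
  · rw [pvMaskHi _ _ 32 (by norm_num) (by omega)]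
    simp [h]

theorem pvMaskF (i : Nat) : Nat.testBit 0xFFFFFFFF i = decide (i < 32) := by
  by_cases h : i < 32
  · interval_cases i <;> decide
  · rw [pvMaskHi _ _ 32 (by norm_num) (by omega)]
    simp [h]

theorem pvTbShlNonneg (a : Int) (h : 0 ≤ a) (k i : Nat) :
    (a <<< k).testBit i = (decide (i ≥ k) && a.testBit (i - k)) := by
  obtain ⟨m, rfl⟩ := Int.eq_ofNat_of_zero_le h
  exact pvTbShlCoe m k i

theorem pvBTb (num : Int) (j : Nat) :
    (swapBitsV1_alt num).testBit j =
      if j < 32 then num.testBit (j ^^^ 1) else num.testBit j := by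
  rw [swapBitsV1_alt,
      show (0xAAAAAAAA : Int) = ((0xAAAAAAAA : Nat) : Int) from rfl,
      show (0x55555555 : Int) = ((0x55555555 : Nat) : Int) from rfl,
      show (0xFFFFFFFF : Int) = ((0xFFFFFFFF : Nat) : Int) from rfl]
  have hnn : (0 : Int) ≤ PySem.Int.band num ((0x55555555 : Nat) : Int) := by
    rw [PySem.Int.band_comm]
    exact PySem.Int.band_nonneg_of_nonneg_left _ (Int.natCast_nonneg _)
  simp only [pvTbBor, pvTbShr, pvTbShlNonneg _ hnn, pvTbBand, pvTbNot, pvTbCoe,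
    pvMaskA, pvMask5, pvMaskF]
  by_cases hj : j < 32
  · rw [if_pos hj]
    interval_cases j <;> simp
  · rw [if_neg hj]
    have h1 : ¬ (j + 1 < 32) := by omega
    have h2 : (decide (j - 1 < 32) && decide ((j - 1) % 2 = 0)) = false := by
      by_cases hc : j - 1 < 32
      · have : (j - 1) % 2 = 1 := by omega
        simp [this]
      · simp [hc]
    simp [hj, h1, h2]

-- ===== VERDICT (by name: the statement is the Claim_ definition above) =====
theorem swapBitsV1_spec : Claim_equal_swapBitsV1 := by
  intro num _
  unfold Spec_swapBitsV1
  apply pvEqOfTb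
  intro j
  rw [pvATb, pvBTb]
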